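-- pv_equiv track=rewrite | github.com/KaliGa70/Competitive-Programing | Python/Good_Sequence.py | Good_Sequence
-- ===== SOURCE A (Python) =====
-- from collections import Counter
--
-- def Good_Sequence(x):
--     counts = Counter(x)  # Cuenta los elementos en la lista x
--     remv = 0
--     for num, freq in counts.items():
--         if freq > num:
--             remv += freq - num
--         elif freq < num:
--             remv += freq
--     return remv
-- ===== SOURCE B (Python) =====
-- def Good_Sequence(x):
--     s = sorted(x)
--     total = 0
--     i = 0
--     n = len(s)
--     while i < n:
--         j = i
--         while j < n and s[j] == s[i]:
--             j += 1
--         num, freq = s[i], j - i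
--         if freq > num:
--             total += freq - num
--         elif freq < num:
--             total += freq
--         i = j
--     return total
-- ===== Notes on version B (the rewrite author's own statement) =====
-- stated objective: alternative
-- what changed: Replaces the Counter hash map with sorting a copy and scanning consecutive equal runs to obtain each distinct value and its frequency.
import Mathlib
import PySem

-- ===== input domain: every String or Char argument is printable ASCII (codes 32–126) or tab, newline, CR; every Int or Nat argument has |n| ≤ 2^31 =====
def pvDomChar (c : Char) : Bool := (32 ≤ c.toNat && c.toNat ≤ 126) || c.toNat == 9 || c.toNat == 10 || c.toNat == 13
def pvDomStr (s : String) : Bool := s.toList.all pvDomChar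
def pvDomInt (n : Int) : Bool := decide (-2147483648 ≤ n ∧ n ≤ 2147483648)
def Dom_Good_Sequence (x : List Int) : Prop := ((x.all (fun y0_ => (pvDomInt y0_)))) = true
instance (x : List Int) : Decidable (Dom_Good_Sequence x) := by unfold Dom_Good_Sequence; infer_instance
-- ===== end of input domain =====

-- B replaces A's Counter hash map by sorting a copy of x and scanning consecutive
-- equal runs for the frequencies (alternative decomposition, same exact result).

-- ===== PORT A =====
-- counts = Counter(x); then fold over counts.items() accumulating removals.
def Good_Sequence (x : List Int) : Int :=
  let counts := PySem.Dict.counter x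
  counts.items.foldl
    (fun remv p =>
      if p.2 > p.1 then remv + (p.2 - p.1)
      else if p.2 < p.1 then remv + p.2
      else remv) 0

-- ===== PORT B =====
-- the inner 'while j < n and s[j] == s[i]' run scan: one run = head + takeWhile equal;
-- the outer loop resumes at j, i.e. on dropWhile equal.
def Good_Sequence_runScan : List Int → Int
  | [] => 0
  | v :: rest =>
      let freq : Int := 1 + (rest.takeWhile (· == v)).length
      let contrib := if freq > v then freq - v else if freq < v then freq else 0
      contrib + Good_Sequence_runScan (rest.dropWhile (· == v))
termination_by s => s.length
decreasing_by
  simp only [List.length_cons]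
  exact Nat.lt_succ_of_le (List.length_dropWhile_le _ _)

def Good_Sequence_alt (x : List Int) : Int :=
  Good_Sequence_runScan (PySem.List.sorted x (fun v => v) false)

-- ===== PRECONDITION & SPEC =====
def Spec_Good_Sequence (x : List Int) (out : Int) : Prop := out = Good_Sequence_alt x
instance (x : List Int) (out : Int) : Decidable (Spec_Good_Sequence x out) := by unfold Spec_Good_Sequence; infer_instance

-- ===== CLAIM (what is proved, stated in full; the proofs are below) =====
def Claim_equal_Good_Sequence : Prop := ∀ (x : List Int), Dom_Good_Sequence x → Spec_Good_Sequence x (Good_Sequence x)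

-- ===== LEMMAS AND PROOFS =====

-- contribution of one distinct value v with frequency c
def gsContrib (v c : Int) : Int := if c > v then c - v else if c < v then c else 0

-- A's fold is the sum of contributions over the counter's items
lemma Good_Sequence_eq_sum (x : List Int) :
    Good_Sequence x = ((PySem.Set.ofList x).map (fun v => gsContrib v (x.count v))).sum := by
  unfold Good_Sequence
  have hstep : (fun (remv : Int) (p : Int × Int) =>
      if p.2 > p.1 then remv + (p.2 - p.1)
      else if p.2 < p.1 then remv + p.2
      else remv) = fun remv p => remv + gsContrib p.1 p.2 := by
    funext remv p
    unfold gsContrib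
    split_ifs <;> ring
  rw [hstep, PySem.List.foldl_add, PySem.Dict.items_counter, List.map_map]
  simp only [Int.zero_add]
  apply congrArg List.sum
  apply List.map_congr_left
  intro k _
  simp [gsContrib]

-- B's run scan on a sorted list is the same sum over its distinct values
lemma runScan_eq_sum (s : List Int) (hs : s.Pairwise (· ≤ ·)) :
    Good_Sequence_runScan s = ((PySem.Set.ofList s).map (fun v => gsContrib v (s.count v))).sum := by
  induction s using Good_Sequence_runScan.induct with
  | case1 => simp [Good_Sequence_runScan]
  | case2 v rest ih =>
    set t := rest.takeWhile (· == v) with ht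
    set d := rest.dropWhile (· == v) with hd
    have hrest : t ++ d = rest := List.takeWhile_append_dropWhile
    have htv : ∀ y ∈ t, y = v := fun y hy => by
      simpa using List.mem_takeWhile_imp hy
    have hrestle : ∀ y ∈ rest, v ≤ y := fun y hy => (List.pairwise_cons.1 hs).1 y hy
    have hdp : d.Pairwise (· ≤ ·) :=
      ((List.pairwise_cons.1 hs).2).sublist (List.dropWhile_sublist _)
    have hdgt : ∀ y ∈ d, v < y := by
      intro y hy
      cases hdcases : d with
      | nil => rw [hdcases] at hy; simp at hy
      | cons h0 dtl =>
        have hlen : 0 < (rest.dropWhile (· == v)).length := by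
          rw [← hd, hdcases]; simp
        have hne : ¬ ((rest.dropWhile (· == v)).get ⟨0, hlen⟩ == v) = true :=
          List.dropWhile_get_zero_not (p := fun x => x == v) rest hlen
        have hh0 : h0 ≠ v := by
          have hget : (rest.dropWhile (· == v)).get ⟨0, hlen⟩ = h0 := by
            simpa using List.get_of_eq hdcases ⟨0, hlen⟩
          rw [hget] at hne; simpa using hne
        have hh0mem : h0 ∈ rest := by
          rw [← hrest, hdcases]; simp
        have hvh0 : v < h0 := lt_of_le_of_ne (hrestle h0 hh0mem) (Ne.symm hh0)
        rw [hdcases] at hy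
        rcases List.mem_cons.1 hy with rfl | hy'
        · exact hvh0
        · have : h0 ≤ y := by
            rw [hdcases] at hdp
            exact (List.pairwise_cons.1 hdp).1 y hy'
          exact lt_of_lt_of_le hvh0 this
    have hvd : v ∉ d := fun h => lt_irrefl v (hdgt v h)
    have ihs := ih hdp
    -- the distinct values of v :: rest are (up to permutation) v :: distinct values of d
    have hperm : (PySem.Set.ofList (v :: rest)).Perm (v :: PySem.Set.ofList d) := by
      refine (List.perm_ext_iff_of_nodup (PySem.Set.nodup_ofList _) ?_).2 ?_
      · exact List.nodup_cons.2 ⟨fun h => hvd ((PySem.Set.mem_ofList _ _).1 h),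
          PySem.Set.nodup_ofList _⟩
      · intro a
        simp only [PySem.Set.mem_ofList, List.mem_cons]
        constructor
        · rintro (rfl | ha)
          · exact Or.inl rfl
          · rw [← hrest] at ha
            rcases List.mem_append.1 ha with ha | ha
            · exact Or.inl (htv a ha)
            · exact Or.inr ha
        · rintro (rfl | ha)
          · exact Or.inl rfl
          · exact Or.inr (by rw [← hrest]; exact List.mem_append_right _ ha)
    -- counts
    have hcv : ((v :: rest).count v : Int) = 1 + (t.length : Int) := by
      have h1 : rest.count v = t.length + d.count v := by
        rw [← hrest, List.count_append]
        congr 1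
        exact List.count_eq_length.2 fun b hb => (htv b hb).symm
      have h2 : d.count v = 0 := List.count_eq_zero.2 hvd
      rw [List.count_cons_self, h1, h2]
      push_cast; ring
    have hcw : ∀ w ∈ PySem.Set.ofList d, (v :: rest).count w = d.count w := by
      intro w hw
      have hwd : w ∈ d := (PySem.Set.mem_ofList _ _).1 hw
      have hwv : w ≠ v := fun h => hvd (h ▸ hwd)
      have hwt : w ∉ t := fun h => hwv (htv w h)
      rw [← hrest]
      simp [List.count_append, Ne.symm hwv, List.count_eq_zero.2 hwt]
    calc Good_Sequence_runScan (v :: rest)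
        = gsContrib v (1 + (t.length : Int)) + Good_Sequence_runScan d := by
          rw [Good_Sequence_runScan]; rfl
      _ = ((v :: PySem.Set.ofList d).map (fun w => gsContrib w ((v :: rest).count w))).sum := by
          rw [List.map_cons, List.sum_cons, hcv, ihs]
          congr 1
          exact congrArg List.sum (List.map_congr_left (fun w hw => by rw [hcw w hw]))
      _ = ((PySem.Set.ofList (v :: rest)).map (fun w => gsContrib w ((v :: rest).count w))).sum :=
          ((hperm.map _).sum_eq).symm

-- ===== VERDICT (by name: the statement is the Claim_ definition above) =====
theorem Good_Sequence_spec : Claim_equal_Good_Sequence := by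
  intro x _
  unfold Spec_Good_Sequence Good_Sequence_alt
  set s := PySem.List.sorted x (fun v => v) false with hsdef
  have hperm : s.Perm x := PySem.List.sorted_perm x (fun v => v) false
  have hpw : s.Pairwise (· ≤ ·) := by
    simpa using PySem.List.sorted_pairwise x (fun v : Int => v)
  rw [Good_Sequence_eq_sum, runScan_eq_sum s hpw]
  have hsets : (PySem.Set.ofList x).Perm (PySem.Set.ofList s) := by
    refine (List.perm_ext_iff_of_nodup (PySem.Set.nodup_ofList _) (PySem.Set.nodup_ofList _)).2 ?_
    intro a
    simp only [PySem.Set.mem_ofList]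
    exact hperm.mem_iff.symm
  calc ((PySem.Set.ofList x).map (fun v => gsContrib v (x.count v))).sum
      = ((PySem.Set.ofList s).map (fun v => gsContrib v (x.count v))).sum :=
        (hsets.map _).sum_eq
    _ = ((PySem.Set.ofList s).map (fun v => gsContrib v (s.count v))).sum := by
        apply congrArg
        apply List.map_congr_left
        intro w _
        rw [hperm.count_eq]
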